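-- pv_equiv track=rewrite | github.com/malibayram/tokenizer | turkish_tokenizer/tr_tokenizer.py | _camel_split_with_positions
-- ===== SOURCE A (Python) =====
-- from typing import Dict, List, Optional, Tuple
--
-- def _camel_split_with_positions(word: str) -> List[Tuple[str, int]]:
--     if not word:
--         return []
--
--     parts = []
--     start = 0
--
--     for i in range(1, len(word)):
--         if word[i].isupper():
--             if start < i:
--                 parts.append((word[start:i].lower(), start))
--             start = i
--
--     if start < len(word):
--         parts.append((word[start:].lower(), start))
--
--     return parts if parts else [(word.lower(), 0)]
-- ===== SOURCE B (Python) =====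
-- def _camel_split_with_positions(word):
--     if not word:
--         return []
--     bounds = [0] + [i for i in range(1, len(word)) if word[i].isupper()]
--     ends = bounds[1:] + [len(word)]
--     return [(word[s:e].lower(), s) for s, e in zip(bounds, ends)]
-- ===== Notes on version B (the rewrite author's own statement) =====
-- stated objective: alternative
-- what changed: Replaces the stateful single scan (mutable start index with conditional flushes and a dead fallback branch) by first collecting all boundary start indices, then pairing each start with the next boundary (or the word length) via zip to slice the segments.
import Mathlib
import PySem

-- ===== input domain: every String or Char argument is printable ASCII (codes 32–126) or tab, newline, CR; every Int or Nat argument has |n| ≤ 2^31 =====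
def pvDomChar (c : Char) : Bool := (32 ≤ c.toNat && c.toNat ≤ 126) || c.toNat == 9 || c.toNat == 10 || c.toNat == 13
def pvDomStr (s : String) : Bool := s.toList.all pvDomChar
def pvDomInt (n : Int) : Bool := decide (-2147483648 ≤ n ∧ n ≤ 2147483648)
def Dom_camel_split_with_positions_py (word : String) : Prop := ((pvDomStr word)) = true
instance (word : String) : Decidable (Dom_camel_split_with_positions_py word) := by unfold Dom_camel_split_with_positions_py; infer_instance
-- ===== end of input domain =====

-- B replaces A's stateful scan (mutable start with conditional flushes) by a boundary-index
-- list zipped with its shifted self; same cost, plainer decomposition.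

-- ===== PORT A =====
def camel_split_with_positions_py (word : String) : List (String × Int) :=
  if word = "" then []
  else
    let st :=
      (PySem.List.pyRange 1 (PySem.Str.len word) 1).foldl
        (fun (s : List (String × Int) × Int) (i : Int) =>
          match PySem.Str.pyGet? word i with
          | some c =>
              if PySem.Chars.isupper c then
                ((if s.2 < i then
                    s.1 ++ [(PySem.Str.lower (PySem.Str.slice word (some s.2) (some i)), s.2)]
                  else s.1), i)
              else s
          | none => s)  -- unreachable: i ∈ range(1, len(word)) is always in range
        ([], 0)
    let parts :=
      if st.2 < PySem.Str.len word then
        st.1 ++ [(PySem.Str.lower (PySem.Str.slice word (some st.2) none), st.2)]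
      else st.1
    if parts.isEmpty then [(PySem.Str.lower word, 0)] else parts

-- ===== PORT B =====
def camel_split_with_positions_py_alt (word : String) : List (String × Int) :=
  if word = "" then []
  else
    let n := PySem.Str.len word
    let bounds : List Int :=
      0 :: (PySem.List.pyRange 1 n 1).filter
        (fun i =>
          match PySem.Str.pyGet? word i with
          | some c => PySem.Chars.isupper c
          | none => false)  -- unreachable: i ∈ range(1, len(word)) is always in range
    let ends := bounds.tail ++ [n]
    (bounds.zip ends).map
      (fun se => (PySem.Str.lower (PySem.Str.slice word (some se.1) (some se.2)), se.1))

-- ===== PRECONDITION & SPEC =====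
def Spec_camel_split_with_positions_py (word : String) (out : List (String × Int)) : Prop := out = camel_split_with_positions_py_alt word
instance (word : String) (out : List (String × Int)) : Decidable (Spec_camel_split_with_positions_py word out) := by unfold Spec_camel_split_with_positions_py; infer_instance

-- ===== CLAIM (what is proved, stated in full; the proofs are below) =====
def Claim_equal_camel_split_with_positions_py : Prop := ∀ (word : String), Dom_camel_split_with_positions_py word → Spec_camel_split_with_positions_py word (camel_split_with_positions_py word)

-- ===== LEMMAS AND PROOFS =====

-- the per-index uppercase test shared by both ports (definitionally equal to their lambdas)
def pvUp (word : String) (i : Int) : Bool :=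
  match PySem.Str.pyGet? word i with
  | some c => PySem.Chars.isupper c
  | none => false

-- boundary list after scanning indices 1..m-1
def pvB (word : String) (m : Int) : List Int :=
  0 :: (PySem.List.pyRange 1 m 1).filter (pvUp word)

def pvSeg (word : String) (se : Int × Int) : String × Int :=
  (PySem.Str.lower (PySem.Str.slice word (some se.1) (some se.2)), se.1)

def pvSegs (word : String) (l : List Int) : List (String × Int) :=
  (l.zip l.tail).map (pvSeg word)

-- A's loop body, named
def pvStepA (word : String) (s : List (String × Int) × Int) (i : Int) : List (String × Int) × Int :=
  match PySem.Str.pyGet? word i with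
  | some c =>
      if PySem.Chars.isupper c then
        ((if s.2 < i then
            s.1 ++ [(PySem.Str.lower (PySem.Str.slice word (some s.2) (some i)), s.2)]
          else s.1), i)
      else s
  | none => s

theorem pvZipEnd (word : String) :
    ∀ (l : List Int) (x : Int), l ≠ [] →
      ((l.zip (l.tail ++ [x])).map (pvSeg word)
        = pvSegs word l ++ [pvSeg word (l.getLastD 0, x)])
  | [a], x, _ => by simp [pvSegs]
  | a :: b :: t, x, _ => by
      have ih := pvZipEnd word (b :: t) x (by simp)
      simp only [pvSegs, List.cons_append, List.tail_cons, List.zip_cons_cons, List.map_cons,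
        List.getLastD_cons] at ih ⊢
      rw [ih]

theorem pvSegsSnoc (word : String) :
    ∀ (l : List Int) (x : Int), l ≠ [] →
      pvSegs word (l ++ [x]) = pvSegs word l ++ [pvSeg word (l.getLastD 0, x)]
  | [a], x, _ => by simp [pvSegs]
  | a :: b :: t, x, _ => by
      have ih := pvSegsSnoc word (b :: t) x (by simp)
      simp only [pvSegs, List.cons_append, List.tail_cons, List.zip_cons_cons, List.map_cons,
        List.getLastD_cons] at ih ⊢
      rw [ih]

theorem pvFoldInv (word : String) : ∀ (m : Nat), 1 ≤ m →
    ((PySem.List.pyRange 1 (m : Int) 1).foldl (pvStepA word) ([], 0)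
        = (pvSegs word (pvB word m), (pvB word m).getLastD 0))
    ∧ (pvB word m).getLastD 0 < (m : Int) ∧ 0 ≤ (pvB word m).getLastD 0 := by
  intro m
  induction m with
  | zero => intro h; omega
  | succ m ih =>
    intro _
    by_cases hm : 1 ≤ m
    · obtain ⟨hfold, hlt, hnn⟩ := ih hm
      have hcast : ((m + 1 : Nat) : Int) = (m : Int) + 1 := by push_cast; ring
      have hsplit : PySem.List.pyRange 1 ((m + 1 : Nat) : Int) 1
          = PySem.List.pyRange 1 (m : Int) 1 ++ [(m : Int)] := by
        rw [hcast, PySem.List.pyRange_one_succ_right (by exact_mod_cast hm)]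
      rw [hsplit, List.foldl_append, hfold]
      by_cases hu : pvUp word (m : Int) = true
      · have hB : pvB word ((m + 1 : Nat) : Int) = pvB word (m : Int) ++ [(m : Int)] := by
          unfold pvB
          rw [hsplit, List.filter_append]
          simp [List.filter, hu]
        have hstep : pvStepA word (pvSegs word (pvB word m), (pvB word m).getLastD 0) (m : Int)
            = (pvSegs word (pvB word m) ++ [pvSeg word ((pvB word m).getLastD 0, (m : Int))], (m : Int)) := by
          unfold pvStepA
          unfold pvUp at hu
          cases hg : PySem.Str.pyGet? word (m : Int) with
          | none => rw [hg] at hu; simp at hu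
          | some c =>
            rw [hg] at hu
            simp only [hu, if_pos hlt, if_true]
            rfl
        have hgl : ((pvB word m ++ [(m : Int)]).getLastD 0) = (m : Int) := by
          simp only [List.getLastD_eq_getLast?, List.getLast?_concat, Option.getD_some]
        rw [hB, List.foldl_cons, List.foldl_nil, hstep,
          pvSegsSnoc word (pvB word m) (m : Int) (by simp [pvB]), hgl]
        refine ⟨rfl, by rw [hcast]; omega, by exact_mod_cast Int.natCast_nonneg m⟩
      · have hB : pvB word ((m + 1 : Nat) : Int) = pvB word (m : Int) := by
          unfold pvB
          rw [hsplit, List.filter_append]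
          simp [Bool.not_eq_true] at hu
          simp [List.filter, hu]
        have hstep : pvStepA word (pvSegs word (pvB word m), (pvB word m).getLastD 0) (m : Int)
            = (pvSegs word (pvB word m), (pvB word m).getLastD 0) := by
          unfold pvStepA
          unfold pvUp at hu
          cases hg : PySem.Str.pyGet? word (m : Int) with
          | none => rfl
          | some c =>
            rw [hg] at hu

            simp [Bool.not_eq_true] at hu
            simp [hu]
        rw [hB, List.foldl_cons, List.foldl_nil, hstep]
        exact ⟨rfl, by rw [hcast]; omega, hnn⟩
    · have hm0 : m = 0 := by omega
      subst hm0
      have h1 : PySem.List.pyRange 1 ((1 : Nat) : Int) 1 = [] :=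
        PySem.List.pyRange_one_eq_nil (by norm_num)
      have hB : pvB word ((0 + 1 : Nat) : Int) = [0] := by
        unfold pvB
        simp only [Nat.zero_add]
        rw [h1]
        rfl
      simp only [Nat.zero_add] at *
      rw [h1, hB]
      simp [pvSegs]

-- the last segment: slicing to the end equals slicing to the length
theorem pvSliceEnd (word : String) (a : Int) (ha : 0 ≤ a) :
    PySem.Str.slice word (some a) none
      = PySem.Str.slice word (some a) (some (word.toList.length : Int)) := by
  unfold PySem.Str.slice
  congr 1
  rw [PySem.Chars.slice_eq_listSlice, PySem.Chars.slice_eq_listSlice]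
  rw [PySem.List.slice_from _ ha, PySem.List.slice_toNat _ ha (Int.natCast_nonneg _)]
  rw [List.take_of_length_le (by simp)]

-- ===== VERDICT (by name: the statement is the Claim_ definition above) =====
theorem camel_split_with_positions_py_spec : Claim_equal_camel_split_with_positions_py := by
  intro word _
  unfold Spec_camel_split_with_positions_py
  unfold camel_split_with_positions_py camel_split_with_positions_py_alt
  by_cases hw : word = ""
  · simp [hw]
  · simp only [if_neg hw]
    have hnil : word.toList ≠ [] := fun h => hw (String.toList_eq_nil_iff.mp h)
    have hlen1 : 1 ≤ word.toList.length := List.length_pos_iff.mpr hnil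
    have hlen : PySem.Str.len word = (word.toList.length : Int) := by simp
    obtain ⟨hfold, hlt, hnn⟩ := pvFoldInv word word.toList.length hlen1
    have hfoldA :
        (PySem.List.pyRange 1 (PySem.Str.len word) 1).foldl
          (fun (s : List (String × Int) × Int) (i : Int) =>
            match PySem.Str.pyGet? word i with
            | some c =>
                if PySem.Chars.isupper c then
                  ((if s.2 < i then
                      s.1 ++ [(PySem.Str.lower (PySem.Str.slice word (some s.2) (some i)), s.2)]
                    else s.1), i)
                else s
            | none => s)
          ([], 0)
        = (pvSegs word (pvB word word.toList.length), (pvB word word.toList.length).getLastD 0) := by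
      rw [hlen]; exact hfold
    rw [hfoldA]
    have hBfilter :
        ((0 : Int) :: (PySem.List.pyRange 1 (PySem.Str.len word) 1).filter
          (fun i =>
            match PySem.Str.pyGet? word i with
            | some c => PySem.Chars.isupper c
            | none => false))
        = pvB word word.toList.length := by
      rw [hlen]; rfl
    rw [hBfilter]
    set L := pvB word word.toList.length with hL
    set a := L.getLastD 0 with hA
    have hLne : L ≠ [] := by simp [hL, pvB]
    simp only [if_pos (hlen ▸ hlt)]
    have hmap :
        (L.zip (L.tail ++ [PySem.Str.len word])).map
            (fun se => (PySem.Str.lower (PySem.Str.slice word (some se.1) (some se.2)), se.1))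
          = (L.zip (L.tail ++ [PySem.Str.len word])).map (pvSeg word) := rfl
    rw [hmap, hlen, pvZipEnd word L (word.toList.length : Int) hLne]
    have hlast : (PySem.Str.lower (PySem.Str.slice word (some a) none), a)
        = pvSeg word (a, (word.toList.length : Int)) := by
      unfold pvSeg
      rw [pvSliceEnd word a hnn]
    rw [hlast]
    simp [hA, List.getLastD_eq_getLast?]
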